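-- pv_equiv track=rewrite | github.com/bonetblai/np2pddl | trunk/tool/instance_predicates.py | generate_all_2arity
-- ===== SOURCE A (Python) =====
-- def generate_all_2arity(rel,n):
--     if n < 2:
--         raise ValueError
--     if n == 2:
--         return ["(" + rel + " zero max)","(" + rel + " zero zero)",\
--                 "(" + rel + " max zero)","(" + rel + " max max)"]
--     s = []
--
--     # zero < obj_i
--     # zero < max
--     s.append("(" + rel + " zero zero)")
--     for i in range(1, n-1):
--         s.append("(" + rel + " zero obj" + str(i) + ")")
--     s.append("(" + rel + " zero max)")
--
--     # obj_i < obj_j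
--     for i in range(1, n-1):
--         s.append("(" + rel + " obj" + str(i) + " zero)")
--         for j in range(1, n-1):
--             s.append("(" + rel + " obj" + str(i) + " obj" + str(j) + ")")
--         s.append("(" + rel + " obj" + str(i) + " max)")
--
--     # obj_i < max
--     s.append("(" + rel + " max zero)")
--     for i in range(1, n-1):
--         s.append("(" + rel + " max obj" + str(i) + ")")
--     s.append("(" + rel + " max max)")
--
--     return s
-- ===== SOURCE B (Python) =====
-- def generate_all_2arity(rel, n):
--     if n < 2:
--         raise ValueError
--     if n == 2:
--         return ["(" + rel + " zero max)", "(" + rel + " zero zero)",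
--                 "(" + rel + " max zero)", "(" + rel + " max max)"]
--     labels = ["zero"] + ["obj" + str(i) for i in range(1, n - 1)] + ["max"]
--     return ["(" + rel + " " + a + " " + b + ")" for a in labels for b in labels]
-- ===== Notes on version B (the rewrite author's own statement) =====
-- stated objective: simpler
-- what changed: Replaces A's three hand-unrolled, boundary-special-cased blocks (zero row, nested obj rows, max row) with an explicit label list and one uniform double-product comprehension; the quirky-ordered n==2 return and the n<2 ValueError are kept.
import Mathlib
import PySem

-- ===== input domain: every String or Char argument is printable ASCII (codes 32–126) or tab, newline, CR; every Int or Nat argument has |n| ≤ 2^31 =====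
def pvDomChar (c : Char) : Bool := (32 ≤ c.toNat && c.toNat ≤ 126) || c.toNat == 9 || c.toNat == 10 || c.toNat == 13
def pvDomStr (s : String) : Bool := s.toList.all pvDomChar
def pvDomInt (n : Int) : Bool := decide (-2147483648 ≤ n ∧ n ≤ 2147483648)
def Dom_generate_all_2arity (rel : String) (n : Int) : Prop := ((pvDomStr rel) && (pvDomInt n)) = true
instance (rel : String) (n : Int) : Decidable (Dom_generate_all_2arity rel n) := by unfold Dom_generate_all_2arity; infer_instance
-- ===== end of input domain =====

-- B replaces A's three hand-unrolled blocks with a label list and one uniform double product (objective: simpler).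


-- ===== PORT A =====
-- literal transliteration of A; the 'n < 2: raise ValueError' path is excluded by Pre_.
def generate_all_2arity (rel : String) (n : Int) : List String :=
  if n == 2 then
    ["(" ++ rel ++ " zero max)", "(" ++ rel ++ " zero zero)",
     "(" ++ rel ++ " max zero)", "(" ++ rel ++ " max max)"]
  else
    let s : List String := []
    let s := s ++ ["(" ++ rel ++ " zero zero)"]
    let s := (PySem.List.pyRange 1 (n - 1) 1).foldl
      (fun acc i => acc ++ ["(" ++ rel ++ " zero obj" ++ PySem.Int.toStr i ++ ")"]) s
    let s := s ++ ["(" ++ rel ++ " zero max)"]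
    let s := (PySem.List.pyRange 1 (n - 1) 1).foldl
      (fun acc i =>
        let acc := acc ++ ["(" ++ rel ++ " obj" ++ PySem.Int.toStr i ++ " zero)"]
        let acc := (PySem.List.pyRange 1 (n - 1) 1).foldl
          (fun acc2 j => acc2 ++ ["(" ++ rel ++ " obj" ++ PySem.Int.toStr i ++ " obj" ++ PySem.Int.toStr j ++ ")"]) acc
        acc ++ ["(" ++ rel ++ " obj" ++ PySem.Int.toStr i ++ " max)"]) s
    let s := s ++ ["(" ++ rel ++ " max zero)"]
    let s := (PySem.List.pyRange 1 (n - 1) 1).foldl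
      (fun acc i => acc ++ ["(" ++ rel ++ " max obj" ++ PySem.Int.toStr i ++ ")"]) s
    s ++ ["(" ++ rel ++ " max max)"]

-- ===== PORT B =====
-- literal transliteration of Source B; the 'n < 2: raise ValueError' path is excluded by Pre_.
def generate_all_2arity_alt (rel : String) (n : Int) : List String :=
  if n == 2 then
    ["(" ++ rel ++ " zero max)", "(" ++ rel ++ " zero zero)",
     "(" ++ rel ++ " max zero)", "(" ++ rel ++ " max max)"]
  else
    let labels : List String :=
      ["zero"] ++ (PySem.List.pyRange 1 (n - 1) 1).map (fun i => "obj" ++ PySem.Int.toStr i) ++ ["max"]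
    labels.flatMap (fun a => labels.map (fun b => "(" ++ rel ++ " " ++ a ++ " " ++ b ++ ")"))

-- ===== PRECONDITION & SPEC =====
-- Pre_ excludes exactly n < 2, where A raises ValueError.
def Pre_generate_all_2arity (rel : String) (n : Int) : Prop := 2 ≤ n
instance (rel : String) (n : Int) : Decidable (Pre_generate_all_2arity rel n) := by unfold Pre_generate_all_2arity; infer_instance
def pvWitness_generate_all_2arity : String × Int := ("lt", 4)

def Spec_generate_all_2arity (rel : String) (n : Int) (out : List String) : Prop := out = generate_all_2arity_alt rel n
instance (rel : String) (n : Int) (out : List String) : Decidable (Spec_generate_all_2arity rel n out) := by unfold Spec_generate_all_2arity; infer_instance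

-- ===== CLAIM (what is proved, stated in full; the proofs are below) =====
def Claim_equal_generate_all_2arity : Prop := ∀ (rel : String) (n : Int), Dom_generate_all_2arity rel n → Pre_generate_all_2arity rel n → Spec_generate_all_2arity rel n (generate_all_2arity rel n)

-- ===== LEMMAS AND PROOFS =====


-- generic literal-merge helper and its instances used by the normalization
theorem strMerge (a b c : String) (h : a ++ b = c) (s : String) : a ++ (b ++ s) = c ++ s := by
  rw [← String.append_assoc, h]
theorem m1 (s : String) : " " ++ ("zero" ++ s) = " zero" ++ s := strMerge _ _ _ rfl s
theorem m2 (s : String) : " " ++ ("max" ++ s) = " max" ++ s := strMerge _ _ _ rfl s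
theorem m3 (s : String) : " " ++ ("obj" ++ s) = " obj" ++ s := strMerge _ _ _ rfl s
theorem m8 (s : String) : " zero" ++ (" obj" ++ s) = " zero obj" ++ s := strMerge _ _ _ rfl s
theorem m9 (s : String) : " max" ++ (" obj" ++ s) = " max obj" ++ s := strMerge _ _ _ rfl s
theorem flattenSingleton {α β : Type} (f : α → β) (l : List α) :
    (l.map (fun x => [f x])).flatten = l.map f := by
  induction l with
  | nil => rfl
  | cons x t ih => simp [ih]

-- ===== VERDICT (by name: the statement is the Claim_ definition above) =====
theorem generate_all_2arity_spec : Claim_equal_generate_all_2arity := by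
  intro rel n _ _
  unfold Spec_generate_all_2arity generate_all_2arity generate_all_2arity_alt
  by_cases h2 : n = 2
  · simp [h2]
  · simp only [beq_iff_eq, h2, if_false]
    simp [PySem.List.foldl_append_singleton_eq_map, List.flatMap_map,
      Function.comp_def, flattenSingleton, String.append_assoc, List.append_assoc,
      List.flatMap_def, m1, m2, m3, m8, m9]
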